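-- pv_equiv track=rewrite | github.com/docking-org/pydock3 | pydock3/files.py | get_leading_comment_block_end_index
-- ===== SOURCE A (Python) =====
-- from typing import List, Tuple, Union, Optional, Dict, Any, TextIO, Generator
--
-- def get_leading_comment_block_end_index(lines: List[str]) -> Union[int, None]:
--     """Get the end index of the leading comment block if it exists."""
--
--     leading_comment_block_end_index = None
--     found_leading_comment_block = False
--     for i in range(len(lines)):
--         line = lines[i].strip()
--         if line.startswith("#"):
--             found_leading_comment_block = True
--             leading_comment_block_end_index = i
--         elif line == "":
--             if found_leading_comment_block:
--                 leading_comment_block_end_index = i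
--             continue
--         elif line != "":
--             break
--
--     return leading_comment_block_end_index
-- ===== SOURCE B (Python) =====
-- def get_leading_comment_block_end_index(lines):
--     """Get the end index of the leading comment block if it exists."""
--     # length of the leading prefix of blank-or-comment lines
--     n = 0
--     for line in lines:
--         s = line.strip()
--         if s == "" or s.startswith("#"):
--             n += 1
--         else:
--             break
--     prefix = lines[:n]
--     if any(line.strip().startswith("#") for line in prefix):
--         return n - 1
--     return None
-- ===== Notes on version B (the rewrite author's own statement) =====
-- stated objective: simpler
-- what changed: Replaces A's running-index/found-flag bookkeeping with a two-step decomposition: compute the length of the leading blank-or-comment prefix, then return len(prefix)-1 iff some line of that prefix is a comment, else None.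
import Mathlib
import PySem

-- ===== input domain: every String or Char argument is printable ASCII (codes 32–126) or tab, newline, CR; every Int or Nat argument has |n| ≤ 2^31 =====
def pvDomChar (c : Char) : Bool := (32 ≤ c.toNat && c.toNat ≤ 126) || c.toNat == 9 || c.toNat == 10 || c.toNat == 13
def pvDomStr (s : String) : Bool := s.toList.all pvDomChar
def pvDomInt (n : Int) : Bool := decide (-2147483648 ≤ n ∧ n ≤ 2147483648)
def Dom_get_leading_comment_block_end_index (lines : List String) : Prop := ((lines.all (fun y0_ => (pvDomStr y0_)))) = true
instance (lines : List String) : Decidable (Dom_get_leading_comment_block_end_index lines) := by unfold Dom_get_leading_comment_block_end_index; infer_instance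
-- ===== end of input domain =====

-- B replaces A's running-index/found-flag loop with a takeWhile prefix plus a separate any-comment test (simpler decomposition, same cost).


-- ===== PORT A =====
def goA_gci (i : Int) : List String → Option Int → Bool → Option Int
  | [], idx, _ => idx
  | l :: rest, idx, found =>
    let line := PySem.Str.strip l
    if PySem.Str.startswith line "#" then
      goA_gci (i + 1) rest (some i) true
    else if line = "" then
      goA_gci (i + 1) rest (if found then some i else idx) found
    else
      idx

def get_leading_comment_block_end_index (lines : List String) : Option Int :=
  goA_gci 0 lines none false

-- ===== PORT B =====
def isCommentLine (l : String) : Bool :=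
  PySem.Str.startswith (PySem.Str.strip l) "#"

def isBlankOrComment (l : String) : Bool :=
  let s := PySem.Str.strip l
  s = "" || PySem.Str.startswith s "#"

def get_leading_comment_block_end_index_alt (lines : List String) : Option Int :=
  let pfx := lines.takeWhile isBlankOrComment
  if pfx.any isCommentLine then some ((pfx.length : Int) - 1) else none

-- ===== PRECONDITION & SPEC =====
def Spec_get_leading_comment_block_end_index (lines : List String) (out : Option Int) : Prop := out = get_leading_comment_block_end_index_alt lines
instance (lines : List String) (out : Option Int) : Decidable (Spec_get_leading_comment_block_end_index lines out) := by unfold Spec_get_leading_comment_block_end_index; infer_instance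

-- ===== CLAIM (what is proved, stated in full; the proofs are below) =====
def Claim_equal_get_leading_comment_block_end_index : Prop := ∀ (lines : List String), Dom_get_leading_comment_block_end_index lines → Spec_get_leading_comment_block_end_index lines (get_leading_comment_block_end_index lines)

-- ===== LEMMAS AND PROOFS =====
lemma takeWhile_cons_of_pos (l : String) (rest : List String) (h : isBlankOrComment l = true) :
    (l :: rest).takeWhile isBlankOrComment = l :: rest.takeWhile isBlankOrComment := by
  simp [List.takeWhile, h]

lemma takeWhile_cons_of_neg (l : String) (rest : List String) (h : isBlankOrComment l = false) :
    (l :: rest).takeWhile isBlankOrComment = [] := by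
  simp [List.takeWhile, h]

lemma goA_gci_true (rest : List String) : ∀ (i : Int),
    goA_gci i rest (some (i - 1)) true =
      some (i + ((rest.takeWhile isBlankOrComment).length : Int) - 1) := by
  induction rest with
  | nil => intro i; simp [goA_gci]
  | cons l rest ih =>
    intro i
    by_cases hc : ['#'] <+: PySem.Chars.strip l.toList
    · rw [show goA_gci i (l :: rest) (some (i - 1)) true = goA_gci (i + 1) rest (some i) true
        from by rw [goA_gci]; simp [hc, PySem.Chars.startswith_iff]]
      have h2 := ih (i + 1)
      simp only [add_sub_cancel_right] at h2
      rw [h2, takeWhile_cons_of_pos l rest (by simp [isBlankOrComment, PySem.Chars.startswith_iff, hc])]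
      simp; ring_nf
    · by_cases hb : PySem.Str.strip l = ""
      · rw [show goA_gci i (l :: rest) (some (i - 1)) true = goA_gci (i + 1) rest (some i) true
          from by rw [goA_gci]; simp [hc, hb, PySem.Chars.startswith_iff]]
        have h2 := ih (i + 1)
        simp only [add_sub_cancel_right] at h2
        rw [h2, takeWhile_cons_of_pos l rest (by simp [isBlankOrComment, hb])]
        simp; ring_nf
      · rw [show goA_gci i (l :: rest) (some (i - 1)) true = some (i - 1)
          from by rw [goA_gci]; simp [hc, hb, PySem.Chars.startswith_iff]]
        rw [takeWhile_cons_of_neg l rest (by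
          simp [isBlankOrComment, hb]
          rw [← Bool.not_eq_true, PySem.Chars.startswith_iff]; exact hc)]
        simp

lemma goA_gci_false (rest : List String) : ∀ (i : Int),
    goA_gci i rest none false =
      (if (rest.takeWhile isBlankOrComment).any isCommentLine then
        some (i + ((rest.takeWhile isBlankOrComment).length : Int) - 1) else none) := by
  induction rest with
  | nil => intro i; simp [goA_gci]
  | cons l rest ih =>
    intro i
    by_cases hc : ['#'] <+: PySem.Chars.strip l.toList
    · rw [show goA_gci i (l :: rest) none false = goA_gci (i + 1) rest (some i) true
        from by rw [goA_gci]; simp [hc, PySem.Chars.startswith_iff]]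
      have h2 := goA_gci_true rest (i + 1)
      simp only [add_sub_cancel_right] at h2
      rw [h2, takeWhile_cons_of_pos l rest (by simp [isBlankOrComment, PySem.Chars.startswith_iff, hc])]
      rw [show (l :: rest.takeWhile isBlankOrComment).any isCommentLine = true
        from by simp [List.any, isCommentLine]; left; simpa [PySem.Chars.startswith_iff] using hc]
      simp; ring_nf
    · by_cases hb : PySem.Str.strip l = ""
      · rw [show goA_gci i (l :: rest) none false = goA_gci (i + 1) rest none false
          from by rw [goA_gci]; simp [hc, hb, PySem.Chars.startswith_iff]]
        rw [ih (i + 1), takeWhile_cons_of_pos l rest (by simp [isBlankOrComment, hb])]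
        rw [show (l :: rest.takeWhile isBlankOrComment).any isCommentLine
            = (rest.takeWhile isBlankOrComment).any isCommentLine
          from by simp [List.any, isCommentLine]; intro h; exact absurd (by simpa [PySem.Chars.startswith_iff] using h) hc]
        split
        · simp; ring_nf
        · rfl
      · rw [show goA_gci i (l :: rest) none false = none
          from by rw [goA_gci]; simp [hc, hb, PySem.Chars.startswith_iff]]
        rw [takeWhile_cons_of_neg l rest (by
          simp [isBlankOrComment, hb]
          rw [← Bool.not_eq_true, PySem.Chars.startswith_iff]; exact hc)]
        simp

-- ===== VERDICT (by name: the statement is the Claim_ definition above) =====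
theorem get_leading_comment_block_end_index_spec : Claim_equal_get_leading_comment_block_end_index := by
  intro lines _
  unfold Spec_get_leading_comment_block_end_index
  unfold get_leading_comment_block_end_index get_leading_comment_block_end_index_alt
  rw [goA_gci_false lines 0]
  split
  · rename_i h; rw [if_pos h]; norm_num
  · rename_i h; rw [if_neg h]
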